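-- pv_equiv track=rewrite | github.com/pakhunchan/advisor_data_dashboard | get_aos_residency.py | get_modified_student_data
-- ===== SOURCE A (Python) =====
-- def get_modified_student_data(results: dict, student) -> dict:
--     # get the list of AOS + residency data
--     AOS_residency_list = results.get("value", [])
--
--     # retrieve and format the AOS data
--     AOS_list = [
--         item.get("AreaOfStudyName")
--         for item in AOS_residency_list
--         if all(keyword not in item.get("AreaOfStudyName") for keyword in ["Residency", "Pathway"])
--     ]
--     AOS = "; ".join(AOS_list)
--
--     # retrieve and format the residency data
--     residency_list = [
--         item.get("AreaOfStudyName")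
--         for item in AOS_residency_list
--         if any(keyword in item.get("AreaOfStudyName") for keyword in ["Residency", "Pathway"])
--     ]
--     residency = "; ".join(residency_list)
--
--     # generate a new student dictionary with AOS and residency added
--     modified_student = {
--         **student,
--         "area_of_study": AOS if AOS else None,
--         "residency": residency if residency else None,
--     }
--
--     return modified_student
-- ===== SOURCE B (Python) =====
-- def get_modified_student_data(results: dict, student) -> dict:
--     # Build both joined strings directly while walking the list once:
--     # no intermediate lists and no join step; None marks "nothing seen yet".
--     AOS = residency = None
--     for item in results.get("value", []):
--         name = item.get("AreaOfStudyName")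
--         if "Residency" in name or "Pathway" in name:
--             residency = name if residency is None else residency + "; " + name
--         else:
--             AOS = name if AOS is None else AOS + "; " + name
--     return {
--         **student,
--         "area_of_study": AOS if AOS else None,
--         "residency": residency if residency else None,
--     }
-- ===== Notes on version B (the rewrite author's own statement) =====
-- stated objective: alternative
-- what changed: Instead of A's two filtered list comprehensions each followed by a '; '.join, B walks the value list once and concatenates each name directly onto one of two accumulated strings (None-sentinel for empty), so no intermediate lists and no join stage exist.
import Mathlib
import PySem

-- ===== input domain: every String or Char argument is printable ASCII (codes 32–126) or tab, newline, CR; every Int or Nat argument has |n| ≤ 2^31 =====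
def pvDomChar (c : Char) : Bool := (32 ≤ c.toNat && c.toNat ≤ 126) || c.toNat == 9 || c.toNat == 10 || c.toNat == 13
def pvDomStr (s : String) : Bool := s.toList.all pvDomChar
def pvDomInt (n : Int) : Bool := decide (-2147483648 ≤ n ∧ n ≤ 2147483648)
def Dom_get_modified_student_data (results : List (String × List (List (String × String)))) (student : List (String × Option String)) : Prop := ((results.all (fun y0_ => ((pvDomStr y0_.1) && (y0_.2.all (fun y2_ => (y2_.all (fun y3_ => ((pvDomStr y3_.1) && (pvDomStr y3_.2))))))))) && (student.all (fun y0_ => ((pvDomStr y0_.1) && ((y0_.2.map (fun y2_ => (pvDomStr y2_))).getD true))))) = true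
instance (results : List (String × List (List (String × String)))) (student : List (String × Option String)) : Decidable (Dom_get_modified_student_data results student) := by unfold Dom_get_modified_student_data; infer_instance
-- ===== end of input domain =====

-- B builds the two '; '-joined strings directly in one walk (None-sentinel accumulators), with no
-- intermediate lists and no join stage; same return value as A.
-- Shared small helpers (identical Python in both versions): the "value" lookup, item.get("AreaOfStudyName"), and the final dict merge.

-- results.get("value", []) — dict lookup is first match in the association list
def pvValue (results : List (String × List (List (String × String)))) : List (List (String × String)) :=
  ((results.find? (fun p => p.1 == "value")).map (·.2)).getD []

-- item.get("AreaOfStudyName") — first match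
def pvLookup (item : List (String × String)) : Option String :=
  (item.find? (fun p => p.1 == "AreaOfStudyName")).map (·.2)

-- item.get("AreaOfStudyName") as a String; only used under Pre_ (lookup succeeds; Python raises TypeError otherwise)
def pvName (item : List (String × String)) : String := (pvLookup item).getD ""

-- {**student, "area_of_study": aos, "residency": res} — identical last line in both versions
def pvMerge (student : List (String × Option String)) (aos res : Option String) : List (String × Option String) :=
  ((((student.foldl (fun d p => d.insert p.1 p.2) PySem.Dict.empty).insert "area_of_study" aos)).insert "residency" res).items

-- ===== PORT A =====
def get_modified_student_data (results : List (String × List (List (String × String)))) (student : List (String × Option String)) : List (String × Option String) :=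
  let AOS_residency_list := pvValue results
  let AOS_list := (AOS_residency_list.filter
      (fun item => (["Residency", "Pathway"] : List String).all (fun keyword => !(PySem.Str.isIn keyword (pvName item))))).map pvName
  let AOS := PySem.Str.join "; " AOS_list
  let residency_list := (AOS_residency_list.filter
      (fun item => (["Residency", "Pathway"] : List String).any (fun keyword => PySem.Str.isIn keyword (pvName item)))).map pvName
  let residency := PySem.Str.join "; " residency_list
  pvMerge student (if AOS = "" then none else some AOS) (if residency = "" then none else some residency)

-- ===== PORT B =====
-- 'x = name if x is None else x + "; " + name'
def pvAcc (x : Option String) (name : String) : Option String :=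
  match x with
  | none => some name
  | some s => some (s ++ "; " ++ name)

-- 'x if x else None' for x that is None or a str
def pvTruthy (x : Option String) : Option String :=
  match x with
  | none => none
  | some s => if s = "" then none else some s

def get_modified_student_data_alt (results : List (String × List (List (String × String)))) (student : List (String × Option String)) : List (String × Option String) :=
  let acc := (pvValue results).foldl
      (fun (acc : Option String × Option String) item =>
        let name := pvName item
        if PySem.Str.isIn "Residency" name || PySem.Str.isIn "Pathway" name then
          (acc.1, pvAcc acc.2 name)
        else
          (pvAcc acc.1 name, acc.2))
      (none, none)
  pvMerge student (pvTruthy acc.1) (pvTruthy acc.2)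

-- ===== PRECONDITION & SPEC =====
-- Pre_ excludes inputs where some item in results["value"] lacks the key "AreaOfStudyName": there Python A
-- raises TypeError ('in' on None), so A returns on exactly the inputs Pre_ admits.
def Pre_get_modified_student_data (results : List (String × List (List (String × String)))) (student : List (String × Option String)) : Prop :=
  ∀ item ∈ pvValue results, (pvLookup item).isSome
instance (results : List (String × List (List (String × String)))) (student : List (String × Option String)) : Decidable (Pre_get_modified_student_data results student) := by unfold Pre_get_modified_student_data; infer_instance

def pvWitness_get_modified_student_data : (List (String × List (List (String × String)))) × (List (String × Option String)) :=
  ([("value", [[("AreaOfStudyName", "Math")], [("AreaOfStudyName", "Residency A")]])], [("name", some "Bob")])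

def Spec_get_modified_student_data (results : List (String × List (List (String × String)))) (student : List (String × Option String)) (out : List (String × Option String)) : Prop := out = get_modified_student_data_alt results student
instance (results : List (String × List (List (String × String)))) (student : List (String × Option String)) (out : List (String × Option String)) : Decidable (Spec_get_modified_student_data results student out) := by unfold Spec_get_modified_student_data; infer_instance

-- ===== CLAIM =====
def Claim_equal_get_modified_student_data : Prop := ∀ (results : List (String × List (List (String × String)))) (student : List (String × Option String)), Dom_get_modified_student_data results student → Pre_get_modified_student_data results student → Spec_get_modified_student_data results student (get_modified_student_data results student)

-- ===== LEMMAS AND PROOFS =====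

-- B's accumulator value after seeing the names l, expressed through A's join.
def pvOptJoin (l : List String) : Option String :=
  if l = [] then none else some (PySem.Str.join "; " l)

theorem chars_join_snoc (sep n : List Char) (l : List (List Char)) (h : l ≠ []) :
    PySem.Chars.join sep (l ++ [n]) = PySem.Chars.join sep l ++ sep ++ n := by
  induction l with
  | nil => exact absurd rfl h
  | cons x xs ih =>
    cases xs with
    | nil => simp [PySem.Chars.join_cons_cons, PySem.Chars.join_singleton]
    | cons y ys =>
      rw [List.cons_append, List.cons_append, PySem.Chars.join_cons_cons,
        show y :: (ys ++ [n]) = (y :: ys) ++ [n] by simp,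
        ih (by simp), PySem.Chars.join_cons_cons]
      simp [List.append_assoc]

theorem str_join_snoc (n : String) (l : List String) (h : l ≠ []) :
    PySem.Str.join "; " (l ++ [n]) = PySem.Str.join "; " l ++ "; " ++ n := by
  apply String.toList_injective
  simp only [PySem.Str.toList_join, String.toList_append, List.map_append, List.map]
  rw [chars_join_snoc _ _ _ (by simpa using h)]

theorem str_join_singleton (n : String) : PySem.Str.join "; " [n] = n := by
  apply String.toList_injective
  simp [PySem.Str.toList_join, PySem.Chars.join_singleton]

theorem pvAcc_optJoin (l : List String) (n : String) :
    pvAcc (pvOptJoin l) n = pvOptJoin (l ++ [n]) := by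
  cases l with
  | nil => simp [pvOptJoin, pvAcc, str_join_singleton]
  | cons x xs =>
    simp only [pvOptJoin, if_neg (by simp : ¬x :: xs = []),
      if_neg (by simp : ¬(x :: xs) ++ [n] = []), pvAcc]
    rw [str_join_snoc n (x :: xs) (by simp)]

def pvCond (item : List (String × String)) : Bool :=
  PySem.Str.isIn "Residency" (pvName item) || PySem.Str.isIn "Pathway" (pvName item)

-- B's fold from accumulators that already hold the names a (non-residency) and r (residency).
theorem pvFoldB (lst : List (List (String × String))) (a r : List String) :
    lst.foldl
      (fun (acc : Option String × Option String) item =>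
        let name := pvName item
        if PySem.Str.isIn "Residency" name || PySem.Str.isIn "Pathway" name then
          (acc.1, pvAcc acc.2 name)
        else
          (pvAcc acc.1 name, acc.2))
      (pvOptJoin a, pvOptJoin r)
    = (pvOptJoin (a ++ (lst.filter (fun item => !pvCond item)).map pvName),
       pvOptJoin (r ++ (lst.filter (fun item => pvCond item)).map pvName)) := by
  induction lst generalizing a r with
  | nil => simp
  | cons x xs ih =>
    simp only [List.foldl_cons, List.filter_cons]
    rw [show (PySem.Str.isIn "Residency" (pvName x) || PySem.Str.isIn "Pathway" (pvName x))
        = pvCond x from rfl]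
    by_cases h : pvCond x
    · rw [if_pos h, pvAcc_optJoin, ih]
      simp [h]
    · rw [if_neg h, pvAcc_optJoin, ih]
      simp [h]

-- 'if join l = "" then none else some (join l)' is pvTruthy of B's accumulator.
theorem pvTruthy_optJoin (l : List String) :
    pvTruthy (pvOptJoin l)
      = (if PySem.Str.join "; " l = "" then none else some (PySem.Str.join "; " l)) := by
  cases l with
  | nil => simp [pvOptJoin, pvTruthy, PySem.Str.join, PySem.Chars.join, List.intercalate]
  | cons x xs => simp [pvOptJoin, pvTruthy]

-- A's two filter conditions are ¬pvCond and pvCond.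
theorem pvAll_eq (item : List (String × String)) :
    (["Residency", "Pathway"] : List String).all
        (fun keyword => !(PySem.Str.isIn keyword (pvName item))) = !pvCond item := by
  simp [pvCond, List.all]

theorem pvAny_eq (item : List (String × String)) :
    (["Residency", "Pathway"] : List String).any
        (fun keyword => PySem.Str.isIn keyword (pvName item)) = pvCond item := by
  simp [pvCond, List.any]

-- ===== VERDICT =====
theorem get_modified_student_data_spec : Claim_equal_get_modified_student_data := by
  intro results student _hDom _hPre
  unfold Spec_get_modified_student_data
  unfold get_modified_student_data get_modified_student_data_alt
  have hfold := pvFoldB (pvValue results) [] []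
  rw [show pvOptJoin ([] : List String) = none from rfl] at hfold
  simp only [hfold, List.nil_append, pvAll_eq, pvAny_eq, pvTruthy_optJoin]
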